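-- pv_equiv track=rewrite | github.com/PMNicolas39/Data_Structure_and_Algorithm | Sorting/Stack.py | number_monster
-- ===== SOURCE A (Python) =====
-- def number_monster(strengths):
--     battlefield = []
--     result = []
--     for monster in strengths:
--         # remove weaker from battlefield
--         while battlefield and battlefield[-1] <= monster:
--             # pop the last element. At this time, new monster isn't still added in stack
--             battlefield.pop()
--         # Append strength in battlefield
--         battlefield.append(monster)
--         # append monster in result
--         result.append(len(battlefield))
--     return result
-- ===== SOURCE B (Python) =====
-- def number_monster(strengths):
--     result = []
--     for i in range(len(strengths)):
--         s = strengths[i]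
--         j = i - 1
--         # scan back past everything not stronger than s
--         while j >= 0 and strengths[j] <= s:
--             j -= 1
--         result.append(1 if j < 0 else result[j] + 1)
--     return result
-- ===== Notes on version B (the rewrite author's own statement) =====
-- stated objective: alternative
-- what changed: Replaced the explicit push/pop stack with an index loop that scans backward to the nearest strictly stronger predecessor and reuses its stored count (result[j]+1), so no stack is maintained at all.
import Mathlib
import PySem

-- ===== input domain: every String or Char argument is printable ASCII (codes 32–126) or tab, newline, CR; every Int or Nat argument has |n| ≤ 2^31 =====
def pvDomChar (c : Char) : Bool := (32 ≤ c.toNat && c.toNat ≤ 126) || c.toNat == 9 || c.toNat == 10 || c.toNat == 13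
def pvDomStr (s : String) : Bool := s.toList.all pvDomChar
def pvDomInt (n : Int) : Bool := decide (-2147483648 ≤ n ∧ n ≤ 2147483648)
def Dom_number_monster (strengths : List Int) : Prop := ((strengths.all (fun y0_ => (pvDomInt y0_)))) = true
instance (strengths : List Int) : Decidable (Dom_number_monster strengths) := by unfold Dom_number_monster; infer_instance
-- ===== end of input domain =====

-- B replaces A's explicit push/pop stack by a backward index scan to the nearest strictly
-- stronger predecessor, reusing the previously stored count (alternative decomposition, no stack).

-- ===== PORT A =====
-- battlefield is stored top-first (head = Python's battlefield[-1]); Python's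
-- pop()/append() at the right end become head operations on the same values.
def popLoop (b : List Int) (m : Int) : List Int :=
  match b with
  | [] => []
  | t :: rest => if t ≤ m then popLoop rest m else t :: rest

def number_monster (strengths : List Int) : List Int :=
  (strengths.foldl (fun (st : List Int × List Int) monster =>
      let b := monster :: popLoop st.1 monster
      (b, st.2 ++ [(b.length : Int)])) ([], [])).2

-- ===== PORT B =====
-- the Python while-loop 'while j >= 0 and strengths[j] <= s: j -= 1';
-- getD's default is never read on actual calls since there 0 ≤ j < strengths.length.
def scanBack (p : List Int) (s : Int) (j : Int) : Int :=
  if 0 ≤ j ∧ p.getD j.toNat 0 ≤ s then scanBack p s (j - 1) else j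
termination_by (j + 1).toNat
decreasing_by omega

-- the loop body of B, named (s = strengths[i]; j = backward scan; append the count)
def bStep (strengths : List Int) (result : List Int) (i : Nat) : List Int :=
  let s := strengths.getD i 0
  let j := scanBack strengths s ((i : Int) - 1)
  result ++ [if j < 0 then 1 else result.getD j.toNat 0 + 1]

def number_monster_alt (strengths : List Int) : List Int :=
  (List.range strengths.length).foldl (bStep strengths) []

-- ===== PRECONDITION & SPEC =====
def Spec_number_monster (strengths : List Int) (out : List Int) : Prop := out = number_monster_alt strengths
instance (strengths : List Int) (out : List Int) : Decidable (Spec_number_monster strengths out) := by unfold Spec_number_monster; infer_instance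

-- ===== CLAIM (what is proved, stated in full; the proofs are below) =====
def Claim_equal_number_monster : Prop := ∀ (strengths : List Int), Dom_number_monster strengths → Spec_number_monster strengths (number_monster strengths)

-- ===== LEMMAS AND PROOFS =====

-- A's fold body, named for the proofs (definitionally the lambda in the port).
def fA : List Int × List Int → Int → List Int × List Int := fun st monster =>
  let b := monster :: popLoop st.1 monster
  (b, st.2 ++ [(b.length : Int)])

-- the stack A holds after processing p
def stackOf (p : List Int) : List Int := p.foldl (fun b m => m :: popLoop b m) []

theorem getD_append_left (l l' : List Int) (i : Nat) (h : i < l.length) :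
    (l ++ l').getD i 0 = l.getD i 0 := by
  simp [List.getD_eq_getElem?_getD, List.getElem?_append_left h]

theorem getD_append_length (l : List Int) (y : Int) :
    (l ++ [y]).getD l.length 0 = y := by
  simp [List.getD_eq_getElem?_getD]

theorem bStep_eq (q a : List Int) (i : Nat) :
    bStep q a i = a ++ [if scanBack q (q.getD i 0) ((i : Int) - 1) < 0 then 1
      else a.getD (scanBack q (q.getD i 0) ((i : Int) - 1)).toNat 0 + 1] := rfl

theorem A_fst : ∀ (p : List Int) (b r : List Int),
    (p.foldl fA (b, r)).1 = p.foldl (fun b m => m :: popLoop b m) b := by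
  intro p
  induction p with
  | nil => intro b r; rfl
  | cons m p ih => intro b r; simp only [List.foldl_cons]; exact ih _ _

theorem A_snd_len : ∀ (p : List Int) (b r : List Int),
    (p.foldl fA (b, r)).2.length = r.length + p.length := by
  intro p
  induction p with
  | nil => intro b r; simp
  | cons m p ih =>
    intro b r
    simp only [List.foldl_cons]
    rw [ih]
    simp [fA]
    omega

theorem A_length (p : List Int) : (number_monster p).length = p.length := by
  have := A_snd_len p [] []
  simpa [number_monster, fA] using this

theorem A_append (p : List Int) (x : Int) :
    number_monster (p ++ [x]) =
      number_monster p ++ [((popLoop (stackOf p) x).length + 1 : Int)] := by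
  show (List.foldl fA ([], []) (p ++ [x])).2 = (List.foldl fA ([], []) p).2 ++ _
  rw [List.foldl_append]
  simp only [List.foldl_cons, List.foldl_nil]
  have h1 := A_fst p [] []
  simp only [fA]
  rw [h1]
  simp [stackOf]

theorem stackOf_append (p : List Int) (x : Int) :
    stackOf (p ++ [x]) = x :: popLoop (stackOf p) x := by
  simp [stackOf, List.foldl_append]

theorem popLoop_popLoop (b : List Int) (x m : Int) (h : x ≤ m) :
    popLoop (popLoop b x) m = popLoop b m := by
  induction b with
  | nil => rfl
  | cons t rest ih =>
    by_cases hx : t ≤ x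
    · have hm : t ≤ m := le_trans hx h
      simp [popLoop, hx, hm, ih]
    · simp [popLoop, hx]

theorem scanBack_le (p : List Int) (s : Int) (j : Int) : scanBack p s j ≤ j := by
  rw [scanBack]
  split
  · have := scanBack_le p s (j - 1); omega
  · omega
termination_by (j + 1).toNat
decreasing_by omega

theorem scanBack_append (p : List Int) (x s : Int) (j : Int) (hj : j < (p.length : Int)) :
    scanBack (p ++ [x]) s j = scanBack p s j := by
  rw [scanBack]
  conv_rhs => rw [scanBack]
  by_cases h0 : 0 ≤ j
  · have hlt : j.toNat < p.length := by omega
    have hg : (p ++ [x]).getD j.toNat 0 = p.getD j.toNat 0 :=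
      getD_append_left p [x] j.toNat hlt
    rw [hg]
    split
    · exact scanBack_append p x s (j - 1) (by omega)
    · rfl
  · simp [h0]
termination_by (j + 1).toNat
decreasing_by omega

-- the core invariant: the length of A's stack after popping for a new monster m equals
-- the count B reads back at the nearest strictly stronger predecessor.
theorem key (p : List Int) (m : Int) :
    ((popLoop (stackOf p) m).length : Int) =
      (if scanBack p m ((p.length : Int) - 1) < 0 then 0
       else (number_monster p).getD (scanBack p m ((p.length : Int) - 1)).toNat 0) := by
  induction p using List.reverseRecOn with
  | nil =>
    rw [scanBack]
    norm_num [stackOf, popLoop]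
  | append_singleton p x ih =>
    have hn : ((p ++ [x]).length : Int) - 1 = (p.length : Int) := by simp
    rw [hn, stackOf_append, scanBack]
    have hgx : (p ++ [x]).getD ((p.length : Int)).toNat 0 = x := by
      rw [Int.toNat_natCast]
      exact getD_append_length p x
    rw [hgx]
    by_cases hx : x ≤ m
    · have hc : (0 ≤ (p.length : Int) ∧ x ≤ m) := ⟨by omega, hx⟩
      rw [if_pos hc, scanBack_append p x m ((p.length : Int) - 1) (by omega)]
      simp only [popLoop, if_pos hx, popLoop_popLoop _ _ _ hx]
      rw [ih]
      set j := scanBack p m ((p.length : Int) - 1) with hj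
      have hle : j ≤ (p.length : Int) - 1 := scanBack_le p m _
      by_cases hneg : j < 0
      · simp [hneg]
      · have hlen : j.toNat < (number_monster p).length := by
          rw [A_length]; omega
        rw [if_neg hneg, if_neg hneg, A_append,
            getD_append_left (number_monster p) _ j.toNat hlen]
    · have hc : ¬ (0 ≤ (p.length : Int) ∧ x ≤ m) := fun h => hx h.2
      rw [if_neg hc]
      have hnneg : ¬ ((p.length : Int) < 0) := by omega
      rw [if_neg hnneg, A_append]
      have hidx : ((p.length : Int)).toNat = (number_monster p).length := by
        rw [A_length, Int.toNat_natCast]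
      rw [hidx, getD_append_length]
      simp only [popLoop, if_neg hx]
      simp

theorem foldl_congr_on {α β : Type} : ∀ (l : List β) (f g : α → β → α),
    (∀ (a : α) (b : β), b ∈ l → f a b = g a b) → ∀ a, l.foldl f a = l.foldl g a := by
  intro l
  induction l with
  | nil => intro f g h a; rfl
  | cons b l ih =>
    intro f g h a
    simp only [List.foldl_cons]
    rw [h a b (List.mem_cons_self ..)]
    exact ih f g (fun a' b' hb' => h a' b' (List.mem_cons_of_mem _ hb')) _

theorem bStep_append (p : List Int) (x : Int) (a : List Int) (i : Nat) (hi : i < p.length) :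
    bStep (p ++ [x]) a i = bStep p a i := by
  rw [bStep_eq, bStep_eq, getD_append_left p [x] i hi,
      scanBack_append p x (p.getD i 0) ((i : Int) - 1) (by omega)]

theorem B_append (p : List Int) (x : Int) :
    number_monster_alt (p ++ [x]) =
      number_monster_alt p ++
        [if scanBack p x ((p.length : Int) - 1) < 0 then 1
         else (number_monster_alt p).getD (scanBack p x ((p.length : Int) - 1)).toNat 0 + 1] := by
  unfold number_monster_alt
  rw [show (p ++ [x]).length = p.length + 1 by simp, List.range_succ, List.foldl_append]
  rw [foldl_congr_on (List.range p.length) (bStep (p ++ [x])) (bStep p)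
        (fun a i hi => bStep_append p x a i (List.mem_range.mp hi)) []]
  simp only [List.foldl_cons, List.foldl_nil]
  rw [bStep_eq, getD_append_length p x,
      scanBack_append p x x ((p.length : Int) - 1) (by omega)]

theorem main_eq (p : List Int) : number_monster p = number_monster_alt p := by
  induction p using List.reverseRecOn with
  | nil => rfl
  | append_singleton p x ih =>
    rw [A_append, B_append, ← ih]
    have hk := key p x
    congr 1
    set j := scanBack p x ((p.length : Int) - 1)
    by_cases hneg : j < 0
    · rw [if_pos hneg] at hk ⊢
      simp only [List.cons.injEq, and_true]
      omega
    · rw [if_neg hneg] at hk ⊢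
      simp only [List.cons.injEq, and_true]
      omega

-- ===== VERDICT (by name: the statement is the Claim_ definition above) =====
theorem number_monster_spec : Claim_equal_number_monster := by
  intro p _
  show number_monster p = number_monster_alt p
  exact main_eq p
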